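-- pv_equiv track=rewrite | github.com/HARSHITA005-GARG/DesktopPilotAI | voice_assistant/main.py | normalize_action_sequence
-- ===== SOURCE A (Python) =====
-- def normalize_action_sequence(actions):
--     """Remove redundant steps the executor already handles internally."""
--     normalized = []
--     for action in actions:
--         if (
--             normalized
--             and action.get("action") == "write_in_app"
--             and normalized[-1].get("action") == "open"
--         ):
--             previous_target = str(normalized[-1].get("target", "")).strip().lower()
--             current_app = str(action.get("app", "")).strip().lower()
--             if previous_target and previous_target == current_app:
--                 normalized.pop()
--
--         normalized.append(action)
--
--     return normalized
-- ===== SOURCE B (Python) =====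
-- def normalize_action_sequence(actions):
--     """Remove redundant steps the executor already handles internally."""
--     result = []
--     n = len(actions)
--     for i, action in enumerate(actions):
--         if (
--             action.get("action") == "open"
--             and i + 1 < n
--             and actions[i + 1].get("action") == "write_in_app"
--         ):
--             target = str(action.get("target", "")).strip().lower()
--             app = str(actions[i + 1].get("app", "")).strip().lower()
--             if target and target == app:
--                 continue  # skip the redundant open; the write handles it
--         result.append(action)
--     return result
-- ===== Notes on version B (the rewrite author's own statement) =====
-- stated objective: alternative
-- what changed: Replaces the stack with pop of the previous element by a forward look-ahead filter: each action is kept unless it is an 'open' whose immediate successor is a matching 'write_in_app', so no mutable result list is inspected or popped.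
import Mathlib
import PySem

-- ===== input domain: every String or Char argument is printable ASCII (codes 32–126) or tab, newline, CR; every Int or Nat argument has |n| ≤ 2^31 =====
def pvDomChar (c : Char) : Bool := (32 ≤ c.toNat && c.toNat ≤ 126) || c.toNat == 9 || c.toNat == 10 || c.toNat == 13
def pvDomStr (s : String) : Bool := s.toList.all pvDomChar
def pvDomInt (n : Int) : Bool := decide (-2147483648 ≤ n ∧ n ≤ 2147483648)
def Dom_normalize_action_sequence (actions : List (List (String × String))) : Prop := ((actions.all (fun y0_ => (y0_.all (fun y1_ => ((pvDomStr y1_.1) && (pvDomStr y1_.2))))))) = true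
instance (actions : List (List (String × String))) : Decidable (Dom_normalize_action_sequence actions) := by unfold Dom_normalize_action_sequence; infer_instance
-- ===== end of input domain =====

-- B replaces A's stack-with-pop by a forward look-ahead filter (different decomposition, same cost).

-- ===== PORT A =====
-- loop body of A's for-loop, as a named step function for the fold
def pvStep (normalized : List (List (String × String))) (action : List (String × String)) :
    List (List (String × String)) :=
  let normalized :=
    if normalized ≠ [] ∧
       PySem.Dict.get? (PySem.Dict.mk action) "action" = some "write_in_app" ∧
       PySem.Dict.get? (PySem.Dict.mk normalized.getLast!) "action" = some "open" then
      let previous_target :=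
        PySem.Str.lower (PySem.Str.strip (PySem.Dict.getD (PySem.Dict.mk normalized.getLast!) "target" ""))
      let current_app :=
        PySem.Str.lower (PySem.Str.strip (PySem.Dict.getD (PySem.Dict.mk action) "app" ""))
      if previous_target ≠ "" ∧ previous_target = current_app then normalized.dropLast
      else normalized
    else normalized
  normalized ++ [action]

def normalize_action_sequence (actions : List (List (String × String))) :
    List (List (String × String)) :=
  actions.foldl pvStep []

-- ===== PORT B =====
-- B's index loop with look-ahead at i+1, as structural recursion peeking at the next element
def pvAltGo : List (List (String × String)) → List (List (String × String))
  | [] => []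
  | action :: rest =>
    match rest with
    | [] => [action]
    | next :: _ =>
      if PySem.Dict.get? (PySem.Dict.mk action) "action" = some "open" ∧
         PySem.Dict.get? (PySem.Dict.mk next) "action" = some "write_in_app" then
        let target := PySem.Str.lower (PySem.Str.strip (PySem.Dict.getD (PySem.Dict.mk action) "target" ""))
        let app := PySem.Str.lower (PySem.Str.strip (PySem.Dict.getD (PySem.Dict.mk next) "app" ""))
        if target ≠ "" ∧ target = app then pvAltGo rest
        else action :: pvAltGo rest
      else action :: pvAltGo rest

def normalize_action_sequence_alt (actions : List (List (String × String))) :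
    List (List (String × String)) :=
  pvAltGo actions

-- ===== PRECONDITION & SPEC =====
def Spec_normalize_action_sequence (actions : List (List (String × String))) (out : List (List (String × String))) : Prop := out = normalize_action_sequence_alt actions
instance (actions : List (List (String × String))) (out : List (List (String × String))) : Decidable (Spec_normalize_action_sequence actions out) := by unfold Spec_normalize_action_sequence; infer_instance

-- ===== CLAIM (what is proved, stated in full; the proofs are below) =====
def Claim_equal_normalize_action_sequence : Prop := ∀ (actions : List (List (String × String))), Dom_normalize_action_sequence actions → Spec_normalize_action_sequence actions (normalize_action_sequence actions)

-- ===== LEMMAS AND PROOFS =====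

-- Once an element a has just been appended, the earlier part ys of the accumulator is
-- never inspected or popped again: the rest of A's fold equals ys ++ B's look-ahead pass.
lemma foldl_pvStep_concat :
    ∀ (rest : List (List (String × String))) (ys : List (List (String × String)))
      (a : List (String × String)),
      List.foldl pvStep (ys ++ [a]) rest = ys ++ pvAltGo (a :: rest) := by
  intro rest
  induction rest with
  | nil => intro ys a; simp [pvAltGo]
  | cons b rest' ih =>
    intro ys a
    have hstep : pvStep (ys ++ [a]) b =
        (if PySem.Dict.get? (PySem.Dict.mk b) "action" = some "write_in_app" ∧
            PySem.Dict.get? (PySem.Dict.mk a) "action" = some "open" then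
          if PySem.Str.lower (PySem.Str.strip (PySem.Dict.getD (PySem.Dict.mk a) "target" "")) ≠ "" ∧
             PySem.Str.lower (PySem.Str.strip (PySem.Dict.getD (PySem.Dict.mk a) "target" "")) =
               PySem.Str.lower (PySem.Str.strip (PySem.Dict.getD (PySem.Dict.mk b) "app" "")) then ys
          else ys ++ [a]
        else ys ++ [a]) ++ [b] := by
      simp [pvStep]
    have hkeep : pvAltGo (a :: b :: rest') = a :: pvAltGo (b :: rest') →
        List.foldl pvStep ((ys ++ [a]) ++ [b]) rest' = ys ++ pvAltGo (a :: b :: rest') := by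
      intro h
      rw [ih (ys ++ [a]) b, h]
      simp
    rw [List.foldl_cons, hstep]
    by_cases hw : PySem.Dict.get? (PySem.Dict.mk b) "action" = some "write_in_app"
    · by_cases ho : PySem.Dict.get? (PySem.Dict.mk a) "action" = some "open"
      · by_cases hm : PySem.Str.lower (PySem.Str.strip (PySem.Dict.getD (PySem.Dict.mk a) "target" "")) ≠ "" ∧
            PySem.Str.lower (PySem.Str.strip (PySem.Dict.getD (PySem.Dict.mk a) "target" "")) =
              PySem.Str.lower (PySem.Str.strip (PySem.Dict.getD (PySem.Dict.mk b) "app" ""))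
        · rw [if_pos (And.intro hw ho), if_pos hm, ih ys b]
          have h : pvAltGo (a :: b :: rest') = pvAltGo (b :: rest') := by
            simp only [pvAltGo]
            rw [if_pos (And.intro ho hw), if_pos hm]
          rw [h]
        · rw [if_pos (And.intro hw ho), if_neg hm]
          exact hkeep (by simp only [pvAltGo]; rw [if_pos (And.intro ho hw), if_neg hm])
      · rw [if_neg (fun h => ho h.2)]
        exact hkeep (by simp only [pvAltGo]; rw [if_neg (fun h => ho h.1)])
    · rw [if_neg (fun h => hw h.1)]
      exact hkeep (by simp only [pvAltGo]; rw [if_neg (fun h => hw h.2)])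

lemma normalize_eq_alt (actions : List (List (String × String))) :
    normalize_action_sequence actions = normalize_action_sequence_alt actions := by
  cases actions with
  | nil => rfl
  | cons a rest =>
    have h0 : pvStep [] a = [] ++ [a] := by simp [pvStep]
    show List.foldl pvStep [] (a :: rest) = pvAltGo (a :: rest)
    rw [List.foldl_cons, h0, foldl_pvStep_concat rest [] a, List.nil_append]

-- ===== VERDICT (by name: the statement is the Claim_ definition above) =====
theorem normalize_action_sequence_spec : Claim_equal_normalize_action_sequence := by
  intro actions _
  exact normalize_eq_alt actions
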